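-- pv_equiv track=rewrite | github.com/Maks22242/MathModeling | Lab4/main.py | squreNumbIn
-- ===== SOURCE A (Python) =====
-- def squreNumbIn(numb, leng):
--         iter = 1
--         newNumb = 0
--         st = 0
--         while iter != leng*2:
--             if iter <= leng/2:
--                 iter += 1
--                 numb //= 10
--             elif iter > leng/2 and iter <= (leng + leng/2):
--                 newNumb = newNumb + (numb%10) * pow(10, st)
--                 st+=1
--                 numb //= 10
--                 iter += 1
--             else:
--                 break
--         return newNumb
-- ===== SOURCE B (Python) =====
-- def squreNumbIn(numb, leng):
--     if leng <= 0:
--         return 0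
--     return (numb // 10 ** (leng // 2)) % 10 ** leng
-- ===== Notes on version B (the rewrite author's own statement) =====
-- stated objective: faster
-- what changed: Replaced the digit-by-digit while loop (skip leng//2 digits, then collect leng digits) with the closed-form (numb // 10**(leng//2)) % 10**leng, guarded by leng <= 0 -> 0.
import Mathlib
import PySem

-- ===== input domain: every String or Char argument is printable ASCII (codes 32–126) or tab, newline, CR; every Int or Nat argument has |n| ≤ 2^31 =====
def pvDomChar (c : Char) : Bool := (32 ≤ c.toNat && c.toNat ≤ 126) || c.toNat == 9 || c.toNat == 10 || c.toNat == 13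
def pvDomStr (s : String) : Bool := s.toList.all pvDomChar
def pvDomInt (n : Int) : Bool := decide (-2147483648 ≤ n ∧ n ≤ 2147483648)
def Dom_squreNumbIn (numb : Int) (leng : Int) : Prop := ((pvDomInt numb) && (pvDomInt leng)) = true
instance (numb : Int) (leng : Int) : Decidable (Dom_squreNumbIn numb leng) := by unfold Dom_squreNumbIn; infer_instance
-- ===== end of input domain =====

-- B replaces A's digit-by-digit while loop with the closed form
-- (numb // 10^(leng//2)) % 10^leng (0 for leng ≤ 0); a timing run reports it faster.


-- ===== PORT A =====
-- The loop state is (iter, numb, newNumb, st); Python's float guards 'iter <= leng/2'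
-- and 'iter <= leng + leng/2' are ported as the exact integer tests '2*iter ≤ leng'
-- and '2*iter ≤ 3*leng' (equivalent: the floats involved are exact for |leng| ≤ 2^31).
-- 'st' only ever holds 0,1,2,… so it is carried as a Nat exponent.
-- Fuel: each continuing iteration increments iter by 1 starting from 1, and the loop
-- stops at iter = 2*leng at the latest, so (2*leng).toNat + 1 steps always suffice.
def squreNumbInLoop (fuel : Nat) (leng iter numb newNumb : Int) (st : Nat) : Int :=
  match fuel with
  | 0 => newNumb
  | f + 1 =>
    if iter = 2 * leng then newNumb
    else if 2 * iter ≤ leng then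
      squreNumbInLoop f leng (iter + 1) (PySem.Int.floordiv numb 10) newNumb st
    else if 2 * iter ≤ 3 * leng then
      squreNumbInLoop f leng (iter + 1) (PySem.Int.floordiv numb 10)
        (newNumb + (PySem.Int.mod numb 10) * 10 ^ st) (st + 1)
    else newNumb

def squreNumbIn (numb : Int) (leng : Int) : Int :=
  squreNumbInLoop ((2 * leng).toNat + 1) leng 1 numb 0 0

-- ===== PORT B =====
def squreNumbIn_alt (numb : Int) (leng : Int) : Int :=
  if leng ≤ 0 then 0
  else PySem.Int.mod
    (PySem.Int.floordiv numb (10 ^ (PySem.Int.floordiv leng 2).toNat))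
    (10 ^ leng.toNat)

-- ===== PRECONDITION & SPEC =====
def Spec_squreNumbIn (numb : Int) (leng : Int) (out : Int) : Prop := out = squreNumbIn_alt numb leng
instance (numb : Int) (leng : Int) (out : Int) : Decidable (Spec_squreNumbIn numb leng out) := by unfold Spec_squreNumbIn; infer_instance

-- ===== CLAIM (what is proved, stated in full; the proofs are below) =====
def Claim_equal_squreNumbIn : Prop := ∀ (numb : Int) (leng : Int), Dom_squreNumbIn numb leng → Spec_squreNumbIn numb leng (squreNumbIn numb leng)

-- ===== LEMMAS AND PROOFS =====

-- digit decomposition: n % 10^(r+1) = n % 10 + 10 * ((n / 10) % 10^r)  (ediv/emod)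
theorem pv_emod_pow_succ (n : Int) (r : Nat) :
    n % 10 ^ (r + 1) = n % 10 + 10 * ((n / 10) % 10 ^ r) := by
  have hn : n = (n % 10 + 10 * ((n / 10) % 10 ^ r)) + (n / 10 / 10 ^ r) * 10 ^ (r + 1) := by
    have e1 := Int.ediv_add_emod n 10
    have e2 := Int.ediv_add_emod (n / 10) (10 ^ r)
    rw [pow_succ]; linear_combination - e1 - 10 * e2
  have hb0 : (0:Int) < 10 ^ r := pow_pos (by norm_num) r
  have h1 : 0 ≤ n % 10 := Int.emod_nonneg n (by norm_num)
  have h2 : n % 10 < 10 := Int.emod_lt_of_pos n (by norm_num)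
  have h3 : 0 ≤ (n / 10) % 10 ^ r := Int.emod_nonneg _ (by positivity)
  have h4 : (n / 10) % 10 ^ r < 10 ^ r := Int.emod_lt_of_pos _ hb0
  calc n % 10 ^ (r + 1)
      = ((n % 10 + 10 * ((n / 10) % 10 ^ r)) + (n / 10 / 10 ^ r) * 10 ^ (r + 1)) % 10 ^ (r + 1) := by
        rw [← hn]
    _ = (n % 10 + 10 * ((n / 10) % 10 ^ r)) % 10 ^ (r + 1) := Int.add_mul_emod_self_right ..
    _ = n % 10 + 10 * ((n / 10) % 10 ^ r) := by
        apply Int.emod_eq_of_lt (by omega)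
        have : (10:Int) ^ (r + 1) = 10 * 10 ^ r := by ring
        omega

-- collect phase: with 2*iter > leng and exactly r collect steps left
-- (2*(iter+r) ≤ 3*leng + 2 and 3*leng < 2*(iter+r)), the loop adds n % 10^r scaled by 10^st.
theorem pv_collect (r : Nat) : ∀ (f : Nat) (leng iter numb acc : Int) (st : Nat),
    1 ≤ leng → leng < 2 * iter → 2 * (iter + r) ≤ 3 * leng + 2 → 3 * leng < 2 * (iter + r) →
    r + 1 ≤ f →
    squreNumbInLoop f leng iter numb acc st = acc + (numb % 10 ^ r) * 10 ^ st := by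
  induction r with
  | zero =>
    intro f leng iter numb acc st hl hi hub hlb hf
    obtain ⟨f, rfl⟩ : ∃ f', f = f' + 1 := ⟨f - 1, by omega⟩
    simp only [squreNumbInLoop, pow_zero, Int.emod_one, zero_mul, add_zero]
    by_cases h1 : iter = 2 * leng
    · simp [h1]
    · simp only [if_neg h1, if_neg (by omega : ¬ 2 * iter ≤ leng),
        if_neg (by omega : ¬ 2 * iter ≤ 3 * leng)]
  | succ r ih =>
    intro f leng iter numb acc st hl hi hub hlb hf
    obtain ⟨f, rfl⟩ : ∃ f', f = f' + 1 := ⟨f - 1, by omega⟩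
    have hne : iter ≠ 2 * leng := by omega
    have hs : ¬ 2 * iter ≤ leng := by omega
    have hc : 2 * iter ≤ 3 * leng := by omega
    simp only [squreNumbInLoop, if_neg hne, if_neg hs, if_pos hc]
    rw [ih f leng (iter + 1) (PySem.Int.floordiv numb 10) _ (st + 1) hl (by omega)
        (by push_cast at hub ⊢; omega) (by push_cast at hlb ⊢; omega)
        (by omega)]
    rw [PySem.Int.floordiv_eq_ediv_of_pos (by norm_num), PySem.Int.mod_eq_emod_of_pos (by norm_num)]
    rw [pv_emod_pow_succ numb r]
    ring

-- skip phase: k valid skip steps (2*(iter+k) ≤ leng + 2) just divide numb by 10^k.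
theorem pv_skip (k : Nat) : ∀ (f : Nat) (leng iter numb acc : Int) (st : Nat),
    1 ≤ iter → 2 * (iter + k) ≤ leng + 2 →
    squreNumbInLoop (f + k) leng iter numb acc st
      = squreNumbInLoop f leng (iter + k) (numb / 10 ^ k) acc st := by
  induction k with
  | zero => intro f leng iter numb acc st _ _; simp
  | succ k ih =>
    intro f leng iter numb acc st hi hub
    have hs : 2 * iter ≤ leng := by push_cast at hub; omega
    have hne : iter ≠ 2 * leng := by push_cast at hub; omega
    show squreNumbInLoop (f + k + 1) leng iter numb acc st = _
    rw [show f + k + 1 = (f + k) + 1 from rfl]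
    simp only [squreNumbInLoop, if_neg hne, if_pos hs]
    rw [PySem.Int.floordiv_eq_ediv_of_pos (by norm_num)]
    rw [ih f leng (iter + 1) (numb / 10) acc st (by omega) (by push_cast; push_cast at hub; omega)]
    rw [Int.ediv_ediv_of_nonneg (by norm_num : (0:Int) ≤ 10), ← pow_succ',
        show iter + 1 + (k : Int) = iter + ((k + 1 : Nat) : Int) by push_cast; ring]

-- ===== VERDICT (by name: the statement is the Claim_ definition above) =====
theorem squreNumbIn_spec : Claim_equal_squreNumbIn := by
  intro numb leng _
  unfold Spec_squreNumbIn squreNumbIn squreNumbIn_alt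
  by_cases hl : leng ≤ 0
  · -- iter = 1 ≠ 2*leng, both guards fail, the loop breaks with newNumb = 0
    simp only [if_pos hl, squreNumbInLoop]
    rw [if_neg (by omega), if_neg (by omega), if_neg (by omega)]
  · rw [if_neg hl]
    have hl1 : 1 ≤ leng := by omega
    set s : Nat := (PySem.Int.floordiv leng 2).toNat with hs
    have hfd : PySem.Int.floordiv leng 2 = leng / 2 :=
      PySem.Int.floordiv_eq_ediv_of_pos (by norm_num)
    have hsv : (s : Int) = leng / 2 := by
      rw [hs, hfd, Int.toNat_of_nonneg (Int.ediv_nonneg (by omega) (by norm_num))]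
    have h2s : 2 * (s : Int) ≤ leng ∧ leng < 2 * (s : Int) + 2 := by omega
    have hlt : (leng.toNat : Int) = leng := Int.toNat_of_nonneg (by omega)
    have hsl : s ≤ leng.toNat := by omega
    have hfuel : (2 * leng).toNat + 1 = ((2 * leng).toNat + 1 - s) + s := by
      have : (s : Int) ≤ 2 * leng := by omega
      omega
    rw [hfuel, pv_skip s _ leng 1 numb 0 0 (by norm_num) (by omega)]
    rw [pv_collect leng.toNat _ leng (1 + s) (numb / 10 ^ s) 0 0 hl1 (by omega)
        (by omega) (by omega) (by omega)]
    rw [PySem.Int.mod_eq_emod_of_pos (pow_pos (by norm_num) _),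
        PySem.Int.floordiv_eq_ediv_of_pos (pow_pos (by norm_num) _)]
    simp
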